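-- pv_equiv track=rewrite | github.com/sorbetlemon16/hackbright-labs | week1/list-slicing/list-slicing-solution/further_study.py | custom_equality
-- ===== SOURCE A (Python) =====
-- def custom_len(input_list):
--     """Return number of items in the list.
--
--     The function custom_len(input_list) should have
--     the same functionality and result as len(input_list).
--
--     For example:
--
--         >>> custom_len(['Do', 'Re', 'Mi', 'Fa', 'So', 'La', 'Ti', 'Do'])
--         8
--     """
--
--     x = 0
--     # The `_` in the for-loop below is a variable name used to
--     # communicate to other devs that we don't intend to use that
--     # variable anywhere in the body of the for-loop. This is a code
--     # style thing --- Python just thinks `_` is a regular variable.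
--     for _ in input_list:
--         x += 1
--
--     return x
--
-- def custom_equality(some_list, another_list):
--     """Return True if passed lists are identical, False otherwise.
--
--     Like (some_list == another_list), custom_equality(some_list, another_list)
--     should return True if both lists contain the same values in the same indexes.
--
--     For example:
--
--         >>> custom_equality(['Jan', 'Feb', 'Mar'], ['Jan', 'Feb', 'Mar'])
--         True
--
--         >>> custom_equality(['Jan', 'Feb', 'Mar'], ['Jan', 'Mar', 'Feb'])
--         False
--     """
--
--     if custom_len(some_list) != custom_len(another_list):
--         return False
--
--     else:
--         for i in range(len(some_list)):
--             if some_list[i] != another_list[i]: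
--                 return False
--
--         return True
-- ===== SOURCE B (Python) =====
-- from itertools import zip_longest
--
-- _SENTINEL = object()
--
-- def custom_equality(some_list, another_list):
--     """Return True if passed lists are identical, False otherwise."""
--     return all(x == y for x, y in
--                zip_longest(some_list, another_list, fillvalue=_SENTINEL))
-- ===== Notes on version B (the rewrite author's own statement) =====
-- stated objective: idiomatic
-- what changed: Replaces the count-both-lengths pass plus an index loop with a single fused traversal of both lists via itertools.zip_longest and a private sentinel, so a length mismatch surfaces as a failed element comparison.
import Mathlib
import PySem

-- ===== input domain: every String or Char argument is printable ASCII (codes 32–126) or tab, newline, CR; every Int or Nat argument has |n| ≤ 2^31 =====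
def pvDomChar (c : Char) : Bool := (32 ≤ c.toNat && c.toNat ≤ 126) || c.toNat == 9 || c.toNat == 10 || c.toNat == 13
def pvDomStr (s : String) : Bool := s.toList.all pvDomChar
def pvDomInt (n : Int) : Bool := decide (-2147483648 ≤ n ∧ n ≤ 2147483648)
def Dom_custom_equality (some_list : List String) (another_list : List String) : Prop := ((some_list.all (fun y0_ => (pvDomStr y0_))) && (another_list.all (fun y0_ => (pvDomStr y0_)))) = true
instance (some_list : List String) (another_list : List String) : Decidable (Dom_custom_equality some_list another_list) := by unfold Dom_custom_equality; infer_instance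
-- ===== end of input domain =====

-- B replaces A's count-both-lengths pass + index loop with one fused simultaneous traversal of both lists (zip_longest with a sentinel).
-- ===== PORT A =====
def custom_len (input_list : List String) : Int :=
  input_list.foldl (fun x _ => x + 1) 0

-- early-returning index loop of A: for i in range(len(some_list)): if some_list[i] != another_list[i]: return False
-- (indices produced by range are always in range here, so pyGetD's default is never reached)
def pvALoop (some_list another_list : List String) : List Int → Bool
  | [] => true
  | i :: rest =>
      if PySem.List.pyGetD some_list i "" ≠ PySem.List.pyGetD another_list i "" then false
      else pvALoop some_list another_list rest

def custom_equality (some_list : List String) (another_list : List String) : Bool :=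
  if custom_len some_list ≠ custom_len another_list then false
  else pvALoop some_list another_list (PySem.List.pyRange 0 some_list.length 1)

-- ===== PORT B =====
-- all(x == y for x, y in zip_longest(some_list, another_list, fillvalue=_SENTINEL)):
-- a sentinel-vs-element pair is never equal, hence the uneven tails yield false.
def pvZipAll : List String → List String → Bool
  | [], [] => true
  | x :: xs, y :: ys => (x == y) && pvZipAll xs ys
  | _, _ => false

def custom_equality_alt (some_list : List String) (another_list : List String) : Bool :=
  pvZipAll some_list another_list

-- ===== PRECONDITION & SPEC =====
def Spec_custom_equality (some_list : List String) (another_list : List String) (out : Bool) : Prop := out = custom_equality_alt some_list another_list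
instance (some_list : List String) (another_list : List String) (out : Bool) : Decidable (Spec_custom_equality some_list another_list out) := by unfold Spec_custom_equality; infer_instance

-- ===== CLAIM (what is proved, stated in full; the proofs are below) =====
def Claim_equal_custom_equality : Prop := ∀ (some_list : List String) (another_list : List String), Dom_custom_equality some_list another_list → Spec_custom_equality some_list another_list (custom_equality some_list another_list)

-- ===== LEMMAS AND PROOFS =====

lemma custom_len_aux (l : List String) (a : Int) :
    l.foldl (fun x _ => x + 1) a = a + l.length := by
  induction l generalizing a with
  | nil => simp
  | cons x xs ih => simp [List.foldl, ih]; omega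

lemma custom_len_eq (l : List String) : custom_len l = l.length := by
  simp [custom_len, custom_len_aux]

lemma pvZipAll_ne_length (s t : List String) (h : s.length ≠ t.length) :
    pvZipAll s t = false := by
  induction s generalizing t with
  | nil => cases t with
    | nil => simp at h
    | cons y ys => simp [pvZipAll]
  | cons x xs ih => cases t with
    | nil => simp [pvZipAll]
    | cons y ys =>
        simp [pvZipAll]
        intro _
        exact ih ys (by simpa using h)

lemma pvALoop_key (s t u v : List String) (hlen : s.length = t.length)
    (huv : u.length = v.length) :
    pvALoop (u ++ s) (v ++ t) (PySem.List.pyRange u.length (u.length + s.length) 1)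
      = pvZipAll s t := by
  induction s generalizing t u v with
  | nil =>
      cases t with
      | nil => simp [PySem.List.pyRange_one_eq_nil, pvALoop, pvZipAll]
      | cons y ys => simp at hlen
  | cons x xs ih =>
      cases t with
      | nil => simp at hlen
      | cons y ys =>
        have hcons : PySem.List.pyRange (u.length : Int)
            ((u.length : Int) + (x :: xs).length) 1
            = (u.length : Int) :: PySem.List.pyRange ((u.length : Int) + 1)
                ((u.length : Int) + (x :: xs).length) 1 := by
          refine PySem.List.pyRange_one_cons (by simp)
        rw [hcons]
        have hx : PySem.List.pyGetD (u ++ x :: xs) (u.length : Int) "" = x := by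
          rw [PySem.List.pyGetD_natCast]
          simp [List.getD]
        have hy : PySem.List.pyGetD (v ++ y :: ys) (u.length : Int) "" = y := by
          rw [PySem.List.pyGetD_natCast, huv]
          simp [List.getD]
        show pvALoop (u ++ x :: xs) (v ++ y :: ys) _ = _
        rw [pvALoop, hx, hy]
        by_cases hxy : x = y
        · subst hxy
          simp only [ne_eq, not_true_eq_false, if_false, pvZipAll,
            BEq.rfl, Bool.true_and]
          have h1 : u ++ x :: xs = (u ++ [x]) ++ xs := by simp
          have h2 : v ++ x :: ys = (v ++ [x]) ++ ys := by simp
          have h3 : ((u.length : Int) + 1) = ((u ++ [x]).length : Int) := by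
            simp
          have h4 : ((u.length : Int) + (x :: xs).length)
              = ((u ++ [x]).length : Int) + xs.length := by
            simp; ring
          rw [h1, h2, h3, h4]
          exact ih ys (u ++ [x]) (v ++ [x]) (by simpa using hlen) (by simp [huv])
        · simp [hxy, pvZipAll]


-- ===== VERDICT (by name: the statement is the Claim_ definition above) =====
theorem custom_equality_spec : Claim_equal_custom_equality := by
  intro s t _
  show custom_equality s t = custom_equality_alt s t
  unfold custom_equality custom_equality_alt
  by_cases h : s.length = t.length
  · rw [custom_len_eq, custom_len_eq, if_neg (by simp [h])]
    have := pvALoop_key s t [] [] h rfl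
    simpa using this
  · rw [custom_len_eq, custom_len_eq]
    have : (s.length : Int) ≠ t.length := by exact_mod_cast h
    simp only [ne_eq, this, not_false_eq_true, if_true]
    exact (pvZipAll_ne_length s t h).symm
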